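-- pv_equiv track=rewrite | github.com/honzajavorek/py | pythoncz/pages/events/__init__.py | skip_valarm_lines
-- ===== SOURCE A (Python) =====
-- def skip_valarm_lines(ics_text_lines):
--     """
--     Removes VALARM from the iCalendar file as in Google Calendar feeds it can
--     contain invalid elements ACTION:NONE and we don't it in our data.
--     """
--     inside_valarm = False
--
--     for line in ics_text_lines:
--         if inside_valarm:
--             inside_valarm = line != 'END:VALARM'
--         else:
--             inside_valarm = line == 'BEGIN:VALARM'
--             if not inside_valarm:
--                 yield line
-- ===== SOURCE B (Python) =====
-- def skip_valarm_lines(ics_text_lines):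
--     it = iter(ics_text_lines)
--     for line in it:
--         if line == 'BEGIN:VALARM':
--             for inner in it:
--                 if inner == 'END:VALARM':
--                     break
--         else:
--             yield line
-- ===== Notes on version B (the rewrite author's own statement) =====
-- stated objective: simpler
-- what changed: Replaces the boolean inside_valarm state flag by nested consumption of a single shared iterator: on BEGIN:VALARM an inner loop discards lines up to END:VALARM, otherwise the line is yielded.
import Mathlib
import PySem

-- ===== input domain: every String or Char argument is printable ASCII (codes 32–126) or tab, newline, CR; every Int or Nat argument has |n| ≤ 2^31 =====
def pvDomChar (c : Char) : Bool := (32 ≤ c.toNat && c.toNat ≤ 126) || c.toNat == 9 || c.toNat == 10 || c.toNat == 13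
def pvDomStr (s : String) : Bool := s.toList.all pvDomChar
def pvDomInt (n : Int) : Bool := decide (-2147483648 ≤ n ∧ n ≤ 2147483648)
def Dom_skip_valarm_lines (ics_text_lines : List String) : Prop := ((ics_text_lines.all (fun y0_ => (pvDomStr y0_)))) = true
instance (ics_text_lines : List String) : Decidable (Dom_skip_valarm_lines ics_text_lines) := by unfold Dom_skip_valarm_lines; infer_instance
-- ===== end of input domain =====

-- B replaces A's boolean state flag by nested consumption of one iterator (simpler decomposition); return value only (A/B are generators, ported as the list of yielded lines).
-- ===== PORT A =====
-- state machine: inside_valarm flag threaded through the loop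
def skipValarmLoop (inside_valarm : Bool) : List String → List String
  | [] => []
  | line :: rest =>
    if inside_valarm then
      skipValarmLoop (line != "END:VALARM") rest
    else
      if line == "BEGIN:VALARM" then
        skipValarmLoop true rest
      else
        line :: skipValarmLoop false rest

def skip_valarm_lines (ics_text_lines : List String) : List String :=
  skipValarmLoop false ics_text_lines

-- ===== PORT B =====
-- inner loop: consume and discard lines until END:VALARM, return the remainder of the iterator
def dropValarm : List String → List String
  | [] => []
  | inner :: rest => if inner == "END:VALARM" then rest else dropValarm rest

theorem dropValarm_length_le : ∀ (xs : List String), (dropValarm xs).length ≤ xs.length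
  | [] => Nat.le_refl _
  | inner :: rest => by
    simp only [dropValarm]
    split
    · exact Nat.le_succ _
    · exact Nat.le_trans (dropValarm_length_le rest) (Nat.le_succ _)

def skip_valarm_lines_alt (ics_text_lines : List String) : List String :=
  match ics_text_lines with
  | [] => []
  | line :: rest =>
    if line == "BEGIN:VALARM" then
      skip_valarm_lines_alt (dropValarm rest)
    else
      line :: skip_valarm_lines_alt rest
termination_by ics_text_lines.length
decreasing_by
  · exact Nat.lt_succ_of_le (dropValarm_length_le rest)
  · exact Nat.lt_succ_self _

-- ===== PRECONDITION & SPEC =====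
def Spec_skip_valarm_lines (ics_text_lines : List String) (out : List String) : Prop := out = skip_valarm_lines_alt ics_text_lines
instance (ics_text_lines : List String) (out : List String) : Decidable (Spec_skip_valarm_lines ics_text_lines out) := by unfold Spec_skip_valarm_lines; infer_instance

-- ===== CLAIM (what is proved, stated in full; the proofs are below) =====
def Claim_equal_skip_valarm_lines : Prop := ∀ (ics_text_lines : List String), Dom_skip_valarm_lines ics_text_lines → Spec_skip_valarm_lines ics_text_lines (skip_valarm_lines ics_text_lines)

-- ===== LEMMAS AND PROOFS =====

-- ===== VERDICT (by name: the statement is the Claim_ definition above) =====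
theorem skipValarm_agree : ∀ (xs : List String),
    skipValarmLoop true xs = skip_valarm_lines_alt (dropValarm xs) ∧
    skipValarmLoop false xs = skip_valarm_lines_alt xs := by
  intro xs
  induction hn : xs.length using Nat.strong_induction_on generalizing xs with
  | _ n ih =>
    match xs, hn with
    | [], _ => simp [skipValarmLoop, dropValarm, skip_valarm_lines_alt]
    | line :: rest, hn =>
      have hlt : rest.length < n := by simp at hn; omega
      have hrest := ih rest.length hlt rest rfl
      constructor
      · by_cases h : line = "END:VALARM"
        · simp [skipValarmLoop, dropValarm, h, hrest.2]
        · have hb : (line != "END:VALARM") = true := by simp [h]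
          simp [skipValarmLoop, dropValarm, h, hb, hrest.1]
      · by_cases h : line = "BEGIN:VALARM"
        · simp [skipValarmLoop, skip_valarm_lines_alt, h, hrest.1]
        · simp [skipValarmLoop, skip_valarm_lines_alt, h, hrest.2]

theorem skip_valarm_lines_spec : Claim_equal_skip_valarm_lines := by
  intro xs _
  unfold Spec_skip_valarm_lines skip_valarm_lines
  exact (skipValarm_agree xs).2
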